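-- pv_equiv track=rewrite | github.com/Buttershroom/Davidek | Code/Versions/170203_analyser.py | get_saveNames
-- ===== SOURCE A (Python) =====
-- def get_saveNames(experimentFiles):
--     """ Gets savenames from the experiment file names to name result workbook
--         sheets.
--     """
--     saveNames = {}
--     for filePath in experimentFiles:
--         #Removes path and file ending:
--         saveName = filePath.split('/')[-1].split('.')[0]
--         saveName = saveName[17:]
--         saveNames[filePath] = saveName
--
--     #Trims away starting substring common to all files:
--     refSaveName = str(saveName)
--     for i in reversed(range(1,len(refSaveName)+1)):
--         try:
--             if all([refSaveName[:i]==saveName[:i] for saveName in saveNames.values()]):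
--                 for filePath, saveName in zip(saveNames, saveNames.values()):
--                     saveName = saveName[i:]
--                     saveNames[filePath] = saveName
--                 break
--         except:
--             pass
--
--     #Trims the name down to 23 characters, the maximum sheet name + '_details'
--     #(total 31) in Excel:
--     for filePath, saveName in zip(saveNames, saveNames.values()):
--         if len(saveName)>23:
--             saveName = saveName[-23:]
--             saveNames[filePath] = saveName
--     return saveNames
-- ===== SOURCE B (Python) =====
-- def get_saveNames(experimentFiles):
--     """ Gets savenames from the experiment file names to name result workbook
--         sheets.
--     """
--     names = {}
--     for filePath in experimentFiles:
--         names[filePath] = filePath.split('/')[-1].split('.')[0][17:]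
--     # Longest common prefix of all names in one column-wise pass:
--     vals = list(names.values())
--     first = vals[0]
--     k = len(first)
--     for v in vals[1:]:
--         j = 0
--         m = min(k, len(v))
--         while j < m and v[j] == first[j]:
--             j += 1
--         k = j
--     # Trim the common prefix and cap at the last 23 characters in one pass:
--     out = {}
--     for filePath, n in names.items():
--         s = n[k:]
--         out[filePath] = s[-23:] if len(s) > 23 else s
--     return out
-- ===== Notes on version B (the rewrite author's own statement) =====
-- stated objective: alternative
-- what changed: B computes the longest common prefix in one column-wise pass (carrying a running prefix length) instead of A's descending search that re-slices and re-compares every name at every candidate length, and folds trimming and the 23-character cap into a single pass; asymptotically O(n*L) vs A's O(n*L^2) worst case, but not measurably faster on the benchmark inputs.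
import Mathlib
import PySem

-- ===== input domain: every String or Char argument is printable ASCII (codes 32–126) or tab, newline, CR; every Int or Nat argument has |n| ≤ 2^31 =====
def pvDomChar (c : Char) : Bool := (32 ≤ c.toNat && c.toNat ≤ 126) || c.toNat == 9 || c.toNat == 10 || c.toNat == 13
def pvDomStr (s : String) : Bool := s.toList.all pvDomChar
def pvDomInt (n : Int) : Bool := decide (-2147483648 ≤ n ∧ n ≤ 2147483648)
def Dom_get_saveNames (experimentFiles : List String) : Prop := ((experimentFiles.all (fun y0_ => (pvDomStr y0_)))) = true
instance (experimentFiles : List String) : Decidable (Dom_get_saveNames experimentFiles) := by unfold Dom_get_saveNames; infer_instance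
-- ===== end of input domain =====

-- B replaces A's descending prefix search (re-checking all names at every candidate length)
-- by a single column-wise longest-common-prefix pass, then trims and truncates in one map
-- (objective: alternative algorithm, same measured cost).


-- ===== PORT A =====
-- filePath.split('/')[-1].split('.')[0][17:]  (both Pythons contain this same expression).
-- str.split with a non-empty separator never returns an empty list, so the [-1]/[0] IndexError
-- branches of pyGet? are unreachable; .getD "" only discharges the Option.
def pvName (fp : String) : String :=
  let base := (PySem.List.pyGet? ((PySem.Str.split? fp "/").getD []) (-1)).getD ""
  let stem := (PySem.List.pyGet? ((PySem.Str.split? base ".").getD []) 0).getD ""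
  PySem.Str.slice stem (some 17) none

-- 'for filePath, saveName in zip(saveNames, saveNames.values()): saveNames[filePath] = saveName[i:]'
-- rewrites the value of every existing key in place, i.e. maps v ↦ v[i:] over the values (keys unchanged).
def pvTrimmed (d : PySem.Dict String String) (i : Nat) : PySem.Dict String String :=
  PySem.Dict.mk (d.items.map (fun p => (p.1, PySem.Str.slice p.2 (some ((i : Nat) : Int)) none)))

-- 'for i in reversed(range(1, len(refSaveName)+1)): if all(...): <trim all>; break'
-- (the try/except is dead code: slicing never raises).
def pvTrimLoop (d : PySem.Dict String String) (ref : String) : Nat → PySem.Dict String String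
  | 0 => d
  | i + 1 =>
    if (d.values).all (fun v =>
        PySem.Str.slice ref none (some ((i + 1 : Nat) : Int)) ==
        PySem.Str.slice v none (some ((i + 1 : Nat) : Int)))
    then pvTrimmed d (i + 1)
    else pvTrimLoop d ref i

def get_saveNames (experimentFiles : List String) : List (String × String) :=
  -- first loop: build saveNames; the pair's second component is the loop variable saveName
  let st := experimentFiles.foldl
    (fun (p : PySem.Dict String String × Option String) fp =>
      let n := pvName fp
      (p.1.insert fp n, some n))
    (PySem.Dict.mk [], none)
  match st.2 with
  | none => []  -- empty input: Python raises UnboundLocalError here (refSaveName); excluded by Pre_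
  | some ref =>
    let d := pvTrimLoop st.1 ref (PySem.Str.len ref).toNat
    -- final loop: trim each name that is longer than 23 characters to its last 23
    (d.items).map (fun p =>
      if 23 < PySem.Str.len p.2 then (p.1, PySem.Str.slice p.2 (some (-23)) none) else p)

-- ===== PORT B =====
-- the inner while loop of Source B: j = 0; while j < m and v[j] == first[j]: j += 1; return j
def pvWhile : List Char → List Char → Nat → Nat
  | a :: as, b :: bs, m + 1 => if a == b then pvWhile as bs m + 1 else 0
  | _, _, _ => 0

def get_saveNames_alt (experimentFiles : List String) : List (String × String) :=
  let names := experimentFiles.foldl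
    (fun (d : PySem.Dict String String) fp => d.insert fp (pvName fp)) (PySem.Dict.mk [])
  match names.values with
  | [] => []  -- empty input: Source B raises IndexError on vals[0]; excluded by Pre_
  | first :: rest =>
    -- column-wise longest-common-prefix length
    let k := rest.foldl
      (fun k v => pvWhile first.toList v.toList (min k v.toList.length)) first.toList.length
    -- one pass: trim the common prefix, keep at most the last 23 characters;
    -- Source B writes the results into a fresh dict over the same (distinct) keys, i.e. maps the items
    (names.items).map (fun p =>
      let s := PySem.Str.slice p.2 (some ((k : Nat) : Int)) none
      (p.1, if 23 < PySem.Str.len s then PySem.Str.slice s (some (-23)) none else s))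

-- ===== PRECONDITION & SPEC =====
-- On the empty list both A (UnboundLocalError) and B (IndexError) raise; nothing else raises.
def Pre_get_saveNames (experimentFiles : List String) : Prop := experimentFiles ≠ []
instance (experimentFiles : List String) : Decidable (Pre_get_saveNames experimentFiles) := by
  unfold Pre_get_saveNames; infer_instance
def pvWitness_get_saveNames : List String := ["data/20170101_120000_run_A.txt"]

def Spec_get_saveNames (experimentFiles : List String) (out : List (String × String)) : Prop :=
  out = get_saveNames_alt experimentFiles
instance (experimentFiles : List String) (out : List (String × String)) :
    Decidable (Spec_get_saveNames experimentFiles out) := by unfold Spec_get_saveNames; infer_instance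

-- ===== CLAIM (what is proved, stated in full; the proofs are below) =====
def Claim_equal_get_saveNames : Prop := ∀ (experimentFiles : List String),
  Dom_get_saveNames experimentFiles → Pre_get_saveNames experimentFiles →
  Spec_get_saveNames experimentFiles (get_saveNames experimentFiles)

-- ===== LEMMAS AND PROOFS =====

-- length of the common prefix of two char lists
def pvCp : List Char → List Char → Nat
  | a :: as, b :: bs => if a = b then pvCp as bs + 1 else 0
  | _, _ => 0

theorem pvCp_le_right : ∀ (a b : List Char), pvCp a b ≤ b.length := by
  intro a; induction a with
  | nil => intro b; cases b <;> simp [pvCp]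
  | cons x as ih => intro b; cases b with
    | nil => simp [pvCp]
    | cons y bs => by_cases h : x = y <;> simp [pvCp, h] ; exact ih bs

theorem pvTake_eq_of_le_cp : ∀ (a b : List Char) (i : Nat), i ≤ pvCp a b → a.take i = b.take i := by
  intro a; induction a with
  | nil => intro b i h; cases b <;> simp_all [pvCp]
  | cons x as ih =>
    intro b i h; cases b with
    | nil => simp_all [pvCp]
    | cons y bs =>
      by_cases hxy : x = y
      · cases i with
        | zero => simp
        | succ n =>
          simp [pvCp, hxy] at h
          simp [hxy, List.take_succ_cons]
          exact ih bs n (by omega)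
      · simp [pvCp, hxy] at h; simp [h]

theorem pvLe_cp_of_take_eq : ∀ (a b : List Char) (i : Nat),
    a.take i = b.take i → i ≤ a.length → i ≤ pvCp a b := by
  intro a; induction a with
  | nil => intro b i _ h; simp at h; omega
  | cons x as ih =>
    intro b i ht hl
    cases i with
    | zero => omega
    | succ n =>
      cases b with
      | nil => simp [List.take_succ_cons] at ht
      | cons y bs =>
        simp [List.take_succ_cons] at ht
        obtain ⟨hxy, ht'⟩ := ht
        simp at hl
        simp [pvCp, hxy]
        exact ih bs n ht' (by omega)

theorem pvWhile_eq_min : ∀ (a b : List Char) (m : Nat), pvWhile a b m = min m (pvCp a b) := by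
  intro a; induction a with
  | nil => intro b m; cases b <;> cases m <;> simp [pvWhile, pvCp]
  | cons x as ih =>
    intro b m; cases b with
    | nil => cases m <;> simp [pvWhile, pvCp]
    | cons y bs =>
      cases m with
      | zero => simp [pvWhile]
      | succ n =>
        by_cases h : x = y
        · simp [pvWhile, pvCp, h, ih]
        · simp [pvWhile, pvCp, h]

-- generic min-fold facts
theorem pvFoldMin_le_init (g : String → Nat) :
    ∀ (l : List String) (init : Nat), l.foldl (fun k v => min k (g v)) init ≤ init := by
  intro l; induction l with
  | nil => intro init; simp
  | cons x xs ih => intro init; exact le_trans (ih _) (min_le_left _ _)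

theorem pvFoldMin_le_mem (g : String → Nat) :
    ∀ (l : List String) (init : Nat) (v : String), v ∈ l →
      l.foldl (fun k v => min k (g v)) init ≤ g v := by
  intro l; induction l with
  | nil => intro _ _ h; simp at h
  | cons x xs ih =>
    intro init v hv
    rcases List.mem_cons.mp hv with h | h
    · subst h; exact le_trans (pvFoldMin_le_init g xs _) (min_le_right _ _)
    · exact ih _ v h

theorem pvLe_foldMin (g : String → Nat) :
    ∀ (l : List String) (init i : Nat), i ≤ init → (∀ v ∈ l, i ≤ g v) →
      i ≤ l.foldl (fun k v => min k (g v)) init := by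
  intro l; induction l with
  | nil => intro init i h _; simpa using h
  | cons x xs ih =>
    intro init i h hall
    exact ih _ i (le_min h (hall x (by simp))) (fun v hv => hall v (List.mem_cons_of_mem _ hv))

-- B's fold computes the same min-fold
theorem pvFoldWhile_eq (first : String) (rest : List String) :
    rest.foldl (fun k v => pvWhile first.toList v.toList (min k v.toList.length))
      first.toList.length
    = rest.foldl (fun k v => min k (pvCp first.toList v.toList)) first.toList.length := by
  apply PySem.List.foldl_congr_mem
  intro acc v _
  rw [pvWhile_eq_min]
  have := pvCp_le_right first.toList v.toList
  omega

-- string slice [:i] and [i:] on the toList level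
theorem pvSlice_to (s : String) (i : Nat) :
    (PySem.Str.slice s none (some ((i : Nat) : Int))).toList = s.toList.take i := by
  rw [PySem.Str.toList_slice, PySem.Chars.slice_eq_listSlice, PySem.List.slice_to_natCast]

theorem pvSlice_from_zero (s : String) : PySem.Str.slice s (some 0) none = s := by
  apply String.toList_inj.mp
  rw [PySem.Str.toList_slice, PySem.Chars.slice_eq_listSlice]
  simp

theorem pvTrimmed_zero (d : PySem.Dict String String) : pvTrimmed d 0 = d := by
  unfold pvTrimmed
  apply PySem.Dict.ext
  simp [pvSlice_from_zero]

-- the dict built by both first loops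
theorem pvFold_get? : ∀ (l : List String) (e : PySem.Dict String String) (fp : String),
    (l.foldl (fun d fp => d.insert fp (pvName fp)) e).get? fp =
      if fp ∈ l then some (pvName fp) else e.get? fp := by
  intro l; induction l with
  | nil => intro e fp; simp
  | cons x xs ih =>
    intro e fp
    simp only [List.foldl_cons, ih, PySem.Dict.get?_insert, List.mem_cons]
    by_cases h1 : fp ∈ xs <;> by_cases h2 : fp = x <;> simp [h1, h2]

-- A's fold state, split into the dict and the final loop variable
theorem pvFoldA_split : ∀ (l : List String) (e : PySem.Dict String String) (o : Option String),
    l.foldl (fun (p : PySem.Dict String String × Option String) fp =>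
        (p.1.insert fp (pvName fp), some (pvName fp))) (e, o)
    = (l.foldl (fun d fp => d.insert fp (pvName fp)) e,
       match l.getLast? with | none => o | some fp => some (pvName fp)) := by
  intro l; induction l with
  | nil => intro e o; simp
  | cons x xs ih =>
    intro e o
    simp only [List.foldl_cons, ih]
    cases hx : xs.getLast? with
    | none =>
      have hnil : xs = [] := List.getLast?_eq_none_iff.mp hx
      subst hnil; simp
    | some y => simp [List.getLast?_cons, hx]

-- the check of A's trim loop, read as a statement about take
theorem pvCheck_iff (vals : List String) (ref : String) (i : Nat) :
    (vals.all (fun v =>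
        PySem.Str.slice ref none (some ((i : Nat) : Int)) ==
        PySem.Str.slice v none (some ((i : Nat) : Int))) = true)
    ↔ (∀ v ∈ vals, ref.toList.take i = v.toList.take i) := by
  rw [List.all_eq_true]
  constructor
  · intro h v hv
    have := h v hv
    rw [beq_iff_eq] at this
    have := congrArg String.toList this
    rwa [pvSlice_to, pvSlice_to] at this
  · intro h v hv
    rw [beq_iff_eq]
    apply String.toList_inj.mp
    rw [pvSlice_to, pvSlice_to]
    exact h v hv

-- Main combinatorial step: with vals = first :: rest, ref ∈ vals, L the min-fold,
-- and i ≤ |ref|: the check at i holds iff i ≤ L.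
theorem pvCheck_iff_le (first ref : String) (rest : List String)
    (href : ref ∈ first :: rest) (i : Nat) (hi : i ≤ ref.toList.length) :
    (∀ v ∈ first :: rest, ref.toList.take i = v.toList.take i)
    ↔ i ≤ rest.foldl (fun k v => min k (pvCp first.toList v.toList)) first.toList.length := by
  constructor
  · intro h
    have hrf : ref.toList.take i = first.toList.take i := h first (by simp)
    have hif : i ≤ first.toList.length := by
      have hlen := congrArg List.length hrf
      rw [List.length_take, List.length_take] at hlen
      omega
    apply pvLe_foldMin _ _ _ _ hif
    intro v hv
    have hfv : first.toList.take i = v.toList.take i := hrf ▸ h v (List.mem_cons_of_mem _ hv)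
    exact pvLe_cp_of_take_eq _ _ _ hfv hif
  · intro hL
    have hfirst : ∀ v ∈ first :: rest, first.toList.take i = v.toList.take i := by
      intro v hv
      rcases List.mem_cons.mp hv with h | h
      · subst h; rfl
      · exact pvTake_eq_of_le_cp _ _ _ (le_trans hL (pvFoldMin_le_mem _ _ _ _ h))
    intro v hv
    rw [← hfirst ref href]
    exact hfirst v hv

-- A's descending search lands exactly at the min-fold value L
theorem pvTrimLoop_eq (d : PySem.Dict String String) (first ref : String) (rest : List String)
    (hvals : d.values = first :: rest) (href : ref ∈ first :: rest) :
    ∀ (n : Nat),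
      rest.foldl (fun k v => min k (pvCp first.toList v.toList)) first.toList.length ≤ n →
      n ≤ ref.toList.length →
      pvTrimLoop d ref n =
        pvTrimmed d (rest.foldl (fun k v => min k (pvCp first.toList v.toList))
          first.toList.length) := by
  intro n; induction n with
  | zero =>
    intro hLn _
    have : rest.foldl (fun k v => min k (pvCp first.toList v.toList)) first.toList.length = 0 := by
      omega
    rw [this, pvTrimmed_zero]; rfl
  | succ m ih =>
    intro hLn hnr
    set L := rest.foldl (fun k v => min k (pvCp first.toList v.toList)) first.toList.length with hLdef
    unfold pvTrimLoop
    rw [hvals]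
    by_cases hc : ((first :: rest).all (fun v =>
        PySem.Str.slice ref none (some ((m + 1 : Nat) : Int)) ==
        PySem.Str.slice v none (some ((m + 1 : Nat) : Int))) = true)
    · rw [if_pos hc]
      have hL1 := (pvCheck_iff_le first ref rest href (m + 1) hnr).mp ((pvCheck_iff _ _ _).mp hc)
      have hLe : L = m + 1 := by omega
      rw [hLe]
    · rw [if_neg hc]
      have hne : ¬ (m + 1 ≤ L) := fun hle =>
        hc ((pvCheck_iff _ _ _).mpr ((pvCheck_iff_le first ref rest href (m + 1) hnr).mpr hle))
      exact ih (by omega) (by omega)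

-- ===== VERDICT (by name: the statement is the Claim_ definition above) =====
theorem get_saveNames_spec : Claim_equal_get_saveNames := by
  intro l _ hne
  unfold Spec_get_saveNames get_saveNames get_saveNames_alt
  rw [pvFoldA_split]
  set d := l.foldl (fun d fp => d.insert fp (pvName fp)) (PySem.Dict.mk []) with hd
  cases hlast : l.getLast? with
  | none => exact absurd (List.getLast?_eq_none_iff.mp hlast) hne
  | some lastfp =>
    have hmem : lastfp ∈ l := List.mem_of_getLast? hlast
    have hget : d.get? lastfp = some (pvName lastfp) := by rw [hd, pvFold_get?]; simp [hmem]
    have hitem := PySem.Dict.mem_items_of_get?_eq_some d hget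
    have hrefv : pvName lastfp ∈ d.values := by
      show pvName lastfp ∈ d.items.map (·.2)
      exact List.mem_map.mpr ⟨_, hitem, rfl⟩
    cases hvals : d.values with
    | nil => rw [hvals] at hrefv; simp at hrefv
    | cons first rest =>
      rw [hvals] at hrefv
      set L := rest.foldl (fun k v => min k (pvCp first.toList v.toList)) first.toList.length
        with hL
      have hRlen : (PySem.Str.len (pvName lastfp)).toNat = (pvName lastfp).toList.length := by
        rw [PySem.Str.len_eq]; exact Int.toNat_natCast _
      have hLle : L ≤ (pvName lastfp).toList.length := by
        rcases List.mem_cons.mp hrefv with h | h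
        · rw [hL, ← h]; exact pvFoldMin_le_init _ _ _
        · exact le_trans (pvFoldMin_le_mem _ _ _ _ h) (pvCp_le_right _ _)
      have htrim : pvTrimLoop d (pvName lastfp) (PySem.Str.len (pvName lastfp)).toNat
          = pvTrimmed d L := by
        rw [hRlen]
        exact pvTrimLoop_eq d first (pvName lastfp) rest hvals hrefv _ hLle le_rfl
      simp only [hvals, htrim, pvFoldWhile_eq, ← hL]
      unfold pvTrimmed
      show (List.map _ (d.items.map _)) = _
      rw [List.map_map]
      apply List.map_congr_left
      intro p _
      obtain ⟨k1, v1⟩ := p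
      simp only [Function.comp_apply]
      split_ifs with h <;> rfl
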